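-- pv_equiv track=rewrite | github.com/jbrjake/giles | hooks/verify_agent_output.py | _has_unquoted_bracket
-- ===== SOURCE A (Python) =====
-- def _has_unquoted_bracket(s: str) -> bool:
--     """Check if s contains a ] that is not inside quotes.
--
--     Handles backslash-escaped quotes inside double-quoted TOML strings.
--     Single-quoted strings are TOML literal strings (no escape processing).
--     """
--     in_quote = False
--     quote_char = ""
--     i = 0
--     while i < len(s):
--         ch = s[i]
--         if ch == "\\" and in_quote and quote_char == '"':
--             i += 2  # skip escaped char in double-quoted strings
--             continue
--         if ch in ('"', "'") and not in_quote:
--             in_quote = True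
--             quote_char = ch
--         elif ch == quote_char and in_quote:
--             in_quote = False
--         elif ch == "]" and not in_quote:
--             return True
--         i += 1
--     return False
-- ===== SOURCE B (Python) =====
-- def _skip_double(s: str, i: int) -> int:
--     """Return the index just past a double-quoted string whose body starts at i."""
--     n = len(s)
--     while i < n:
--         c = s[i]
--         if c == "\\":
--             i += 2          # escaped char (may step past the end on a trailing backslash)
--         elif c == '"':
--             return i + 1
--         else:
--             i += 1
--     return i                # unterminated: the quote swallows the rest
--
--
-- def _has_unquoted_bracket(s: str) -> bool:
--     """Check if s contains a ] that is not inside quotes.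
--
--     Instead of a per-character quote state machine, consume each quoted
--     region as a whole span and look at what lies between the spans.
--     """
--     i = 0
--     n = len(s)
--     while i < n:
--         c = s[i]
--         if c == "]":
--             return True
--         if c == '"':
--             i = _skip_double(s, i + 1)
--         elif c == "'":
--             j = s.find("'", i + 1)   # literal string: no escapes, first closing quote
--             i = n if j == -1 else j + 1
--         else:
--             i += 1
--     return False
-- ===== Notes on version B (the rewrite author's own statement) =====
-- stated objective: simpler
-- what changed: Replaces A's per-character state machine with in_quote/quote_char flags by a scanner that consumes each quoted span as a whole (a helper for double-quoted strings with escapes, str.find for single-quoted literals) and only inspects characters between spans.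
import Mathlib
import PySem

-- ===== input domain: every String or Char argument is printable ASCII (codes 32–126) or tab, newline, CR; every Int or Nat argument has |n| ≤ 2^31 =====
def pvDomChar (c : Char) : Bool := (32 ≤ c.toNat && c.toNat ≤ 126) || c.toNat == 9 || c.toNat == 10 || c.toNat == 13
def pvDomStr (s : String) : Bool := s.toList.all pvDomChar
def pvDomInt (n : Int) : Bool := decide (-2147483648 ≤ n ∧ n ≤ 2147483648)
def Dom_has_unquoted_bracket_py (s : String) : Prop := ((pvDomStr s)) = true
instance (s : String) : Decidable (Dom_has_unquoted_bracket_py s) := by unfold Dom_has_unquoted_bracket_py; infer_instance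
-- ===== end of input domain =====

-- B replaces A's per-character quote state machine by consuming each quoted span whole
-- (simpler decomposition; same asymptotic cost). Return values proved equal on all strings.

-- ===== PORT A =====
-- A scans with index i and flags in_quote / quote_char; ported as a recursion on the
-- remaining character list (i += 2 = drop one extra char; quote_char "" = none).
def pvGoA : List Char → Bool → Option Char → Bool
  | [], _, _ => false
  | c :: rest, inq, qc =>
    if c = '\\' ∧ inq ∧ qc = some '"' then
      pvGoA (rest.drop 1) inq qc            -- i += 2; continue
    else if (c = '"' ∨ c = '\'') ∧ ¬ inq then
      pvGoA rest true (some c)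
    else if some c = qc ∧ inq then
      pvGoA rest false qc
    else if c = ']' ∧ ¬ inq then
      true
    else
      pvGoA rest inq qc
termination_by l _ _ => l.length
decreasing_by all_goals (simp; try omega)

def has_unquoted_bracket_py (s : String) : Bool := pvGoA s.toList false none

-- ===== PORT B =====
def pvSkipDouble : List Char → List Char
  | [] => []
  | c :: rest =>
    if c = '\\' then pvSkipDouble (rest.drop 1)     -- escaped char
    else if c = '"' then rest                       -- past the closing quote
    else pvSkipDouble rest
termination_by l => l.length
decreasing_by all_goals (simp; try omega)

-- needed only so pvGoB's termination can cite it
theorem pvSkipDouble_length_le : ∀ (n : ℕ) (l : List Char), l.length ≤ n →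
    (pvSkipDouble l).length ≤ l.length := by
  intro n
  induction n with
  | zero => intro l hl; rw [List.eq_nil_of_length_eq_zero (Nat.le_zero.mp hl)]; simp [pvSkipDouble]
  | succ n ih =>
      intro l hl
      cases l with
      | nil => simp [pvSkipDouble]
      | cons c rest =>
          have hr : rest.length ≤ n := by simp at hl; omega
          rw [pvSkipDouble]
          split_ifs
          · have h1 := ih (rest.drop 1) (le_trans (by simp) hr)
            simp at h1 ⊢; omega
          · simp
          · have h1 := ih rest hr; simp; omega

-- the single-quote span: s.find("'", i+1) = dropWhile to the first ', then step past it
def pvSkipSingle (l : List Char) : List Char := (l.dropWhile (· ≠ '\'')).drop 1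

theorem pvSkipSingle_length_le (l : List Char) : (pvSkipSingle l).length ≤ l.length := by
  unfold pvSkipSingle
  calc ((l.dropWhile (· ≠ '\'')).drop 1).length ≤ (l.dropWhile (· ≠ '\'')).length := by simp
    _ ≤ l.length := List.length_dropWhile_le _ _

def pvGoB : List Char → Bool
  | [] => false
  | c :: rest =>
    if c = ']' then true
    else if c = '"' then pvGoB (pvSkipDouble rest)
    else if c = '\'' then pvGoB (pvSkipSingle rest)
    else pvGoB rest
termination_by l => l.length
decreasing_by
  all_goals simp
  · have := pvSkipDouble_length_le rest.length rest le_rfl; omega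
  · have := pvSkipSingle_length_le rest; omega

def has_unquoted_bracket_py_alt (s : String) : Bool := pvGoB s.toList

-- ===== PRECONDITION & SPEC =====
def Spec_has_unquoted_bracket_py (s : String) (out : Bool) : Prop := out = has_unquoted_bracket_py_alt s
instance (s : String) (out : Bool) : Decidable (Spec_has_unquoted_bracket_py s out) := by unfold Spec_has_unquoted_bracket_py; infer_instance

-- ===== CLAIM (what is proved, stated in full; the proofs are below) =====
def Claim_equal_has_unquoted_bracket_py : Prop := ∀ (s : String), Dom_has_unquoted_bracket_py s → Spec_has_unquoted_bracket_py s (has_unquoted_bracket_py s)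

-- ===== LEMMAS AND PROOFS =====
-- Simultaneous invariant, by strong induction on length:
--  · out of quotes, A's scanner agrees with B's (quote_char is irrelevant there);
--  · inside a double quote, A's scanner = B on the list with the quoted span consumed;
--  · inside a single quote, likewise with pvSkipSingle.
theorem pvMain : ∀ (n : ℕ) (l : List Char), l.length ≤ n →
    ((∀ qc, pvGoA l false qc = pvGoB l) ∧
     pvGoA l true (some '"') = pvGoB (pvSkipDouble l) ∧
     pvGoA l true (some '\'') = pvGoB (pvSkipSingle l)) := by
  intro n
  induction n with
  | zero =>
      intro l hl
      rw [List.eq_nil_of_length_eq_zero (Nat.le_zero.mp hl)]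
      refine ⟨fun qc => ?_, ?_, ?_⟩ <;> simp [pvGoA, pvGoB, pvSkipDouble, pvSkipSingle]
  | succ n ih =>
      intro l hl
      cases l with
      | nil =>
          refine ⟨fun qc => ?_, ?_, ?_⟩ <;> simp [pvGoA, pvGoB, pvSkipDouble, pvSkipSingle]
      | cons c rest =>
          have hr : rest.length ≤ n := by simp at hl; omega
          refine ⟨?_, ?_, ?_⟩
          · -- not in a quote
            intro qc
            by_cases hd : c = '"'
            · subst hd
              simp [pvGoA, pvGoB]
              exact (ih rest hr).2.1
            · by_cases hs : c = '\''
              · subst hs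
                simp [pvGoA, pvGoB]
                exact (ih rest hr).2.2
              · by_cases hb : c = ']'
                · subst hb; simp [pvGoA, pvGoB]
                · simp [pvGoA, pvGoB, hd, hs, hb]
                  exact (ih rest hr).1 qc
          · -- inside a double quote
            by_cases he : c = '\\'
            · subst he
              simp only [pvGoA, pvSkipDouble]
              simp
              exact (ih rest.tail (le_trans (by simp) hr)).2.1
            · by_cases hd : c = '"'
              · subst hd
                simp [pvGoA, pvSkipDouble]
                exact (ih rest hr).1 (some '"')
              · simp [pvGoA, pvSkipDouble, he, hd]
                exact (ih rest hr).2.1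
          · -- inside a single quote
            by_cases hs : c = '\''
            · subst hs
              simp [pvGoA, pvSkipSingle, List.dropWhile]
              exact (ih rest hr).1 (some '\'')
            · simpa [pvGoA, pvSkipSingle, List.dropWhile, hs] using (ih rest hr).2.2

-- ===== VERDICT (by name: the statement is the Claim_ definition above) =====
theorem has_unquoted_bracket_py_spec : Claim_equal_has_unquoted_bracket_py := by
  intro s _
  unfold Spec_has_unquoted_bracket_py has_unquoted_bracket_py has_unquoted_bracket_py_alt
  exact (pvMain s.toList.length s.toList le_rfl).1 none
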